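-- pv_equiv track=rewrite | github.com/xuyuemei/BiasEvaluation | Evaluation_Metrics/Gender_Polarity/unigram_matching-copy.py | calculate_gender_polarity_unigram
-- ===== SOURCE A (Python) =====
-- male_tokens = set(["he", "him", "his", "himself", "man", "men", "he's", "boy", "boys"])
--
-- female_tokens = set(["she", "her", "hers", "herself", "woman", "women", "she's", "girl", "girls"])
--
-- def calculate_gender_polarity_unigram(text):
--     words = text.lower().split()
--     male_count = sum(word in male_tokens for word in words)
--     female_count = sum(word in female_tokens for word in words)
--
--     if male_count > female_count:
--         return "male"
--     elif female_count > male_count: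
--         return "female"
--     else:
--         return "neutral"
-- ===== SOURCE B (Python) =====
-- male_tokens = set(["he", "him", "his", "himself", "man", "men", "he's", "boy", "boys"])
--
-- female_tokens = set(["she", "her", "hers", "herself", "woman", "women", "she's", "girl", "girls"])
--
-- def calculate_gender_polarity_unigram(text):
--     diff = 0
--     for word in text.lower().split():
--         if word in male_tokens:
--             diff += 1
--         elif word in female_tokens:
--             diff -= 1
--     if diff > 0:
--         return "male"
--     if diff < 0:
--         return "female"
--     return "neutral"
-- ===== Notes on version B (the rewrite author's own statement) =====
-- stated objective: alternative
-- what changed: Replaces A's two full membership-counting passes over the word list with a single pass maintaining one signed accumulator (+1 male token, -1 female token) whose sign decides the label; correctness relies on the token sets being disjoint.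
import Mathlib
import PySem

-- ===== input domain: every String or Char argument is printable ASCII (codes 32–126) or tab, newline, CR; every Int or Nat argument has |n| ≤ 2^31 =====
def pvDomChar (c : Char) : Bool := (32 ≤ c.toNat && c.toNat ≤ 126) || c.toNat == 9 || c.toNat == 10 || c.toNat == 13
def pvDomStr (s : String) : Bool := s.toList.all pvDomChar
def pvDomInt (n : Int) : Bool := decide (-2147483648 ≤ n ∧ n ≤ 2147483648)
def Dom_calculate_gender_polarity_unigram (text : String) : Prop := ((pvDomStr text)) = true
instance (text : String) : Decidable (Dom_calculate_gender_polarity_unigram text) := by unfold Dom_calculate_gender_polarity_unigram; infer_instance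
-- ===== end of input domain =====

-- B replaces A's two membership-counting passes over the words with one pass keeping a
-- single signed accumulator (+1 male token, -1 female token) whose sign decides the label.
-- ===== PORT A =====
def male_tokens : PySem.Set String :=
  PySem.Set.ofList ["he", "him", "his", "himself", "man", "men", "he's", "boy", "boys"]

def female_tokens : PySem.Set String :=
  PySem.Set.ofList ["she", "her", "hers", "herself", "woman", "women", "she's", "girl", "girls"]

def calculate_gender_polarity_unigram (text : String) : String :=
  let words := PySem.Str.split₀ (PySem.Str.lower text)
  let male_count : Int := (words.map (fun word => if PySem.Set.contains male_tokens word then (1 : Int) else 0)).sum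
  let female_count : Int := (words.map (fun word => if PySem.Set.contains female_tokens word then (1 : Int) else 0)).sum
  if male_count > female_count then "male"
  else if female_count > male_count then "female"
  else "neutral"

-- ===== PORT B =====
def calculate_gender_polarity_unigram_alt (text : String) : String :=
  let diff : Int := (PySem.Str.split₀ (PySem.Str.lower text)).foldl
    (fun diff word =>
      if PySem.Set.contains male_tokens word then diff + 1
      else if PySem.Set.contains female_tokens word then diff - 1
      else diff) 0
  if diff > 0 then "male"
  else if diff < 0 then "female"
  else "neutral"

-- ===== PRECONDITION & SPEC =====
def Spec_calculate_gender_polarity_unigram (text : String) (out : String) : Prop := out = calculate_gender_polarity_unigram_alt text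
instance (text : String) (out : String) : Decidable (Spec_calculate_gender_polarity_unigram text out) := by unfold Spec_calculate_gender_polarity_unigram; infer_instance

-- ===== CLAIM (what is proved, stated in full; the proofs are below) =====
def Claim_equal_calculate_gender_polarity_unigram : Prop := ∀ (text : String), Dom_calculate_gender_polarity_unigram text → Spec_calculate_gender_polarity_unigram text (calculate_gender_polarity_unigram text)

-- ===== LEMMAS AND PROOFS =====

-- the two token sets are disjoint
theorem tokens_disjoint (w : String) (h : w ∈ male_tokens) : w ∉ female_tokens := by
  simp [male_tokens, female_tokens, PySem.Set.ofList] at h ⊢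
  rcases h with rfl|rfl|rfl|rfl|rfl|rfl|rfl|rfl|rfl <;> decide

-- B's single accumulator is A's male count minus A's female count
theorem diff_eq_counts (ws : List String) (a : Int) :
    ws.foldl (fun diff word =>
      if PySem.Set.contains male_tokens word then diff + 1
      else if PySem.Set.contains female_tokens word then diff - 1
      else diff) a
    = a + (ws.map (fun word => if PySem.Set.contains male_tokens word then (1 : Int) else 0)).sum
        - (ws.map (fun word => if PySem.Set.contains female_tokens word then (1 : Int) else 0)).sum := by
  induction ws generalizing a with
  | nil => simp
  | cons w ws ih =>
    simp only [List.foldl_cons, List.map_cons, List.sum_cons, ih]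
    by_cases hm : w ∈ male_tokens
    · simp [hm, tokens_disjoint w hm]; ring
    · by_cases hf : w ∈ female_tokens
      · simp [hm, hf]; ring
      · simp [hm, hf]

-- ===== VERDICT (by name: the statement is the Claim_ definition above) =====
theorem calculate_gender_polarity_unigram_spec : Claim_equal_calculate_gender_polarity_unigram := by
  intro text _
  unfold Spec_calculate_gender_polarity_unigram
  unfold calculate_gender_polarity_unigram calculate_gender_polarity_unigram_alt
  simp only [diff_eq_counts]
  split_ifs <;> first | rfl | omega
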